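-- pv_equiv track=rewrite | github.com/PrashantBhole7/Selenium_Python | Python_Programs/32_String_program_depends_on_reqirements.py | string_check
-- ===== SOURCE A (Python) =====
-- def string_check(s):
--     l = []
--     for i in range(len(s)):
--         if i%2 == 0 and s[i].isalpha():
--             l.append(True)
--         elif i%2 != 0 and s[i].isdigit():
--             l.append(True)
--         else:
--             l.append(False)
--     if False not in l:
--         return True
--     else:
--         return False
-- ===== SOURCE B (Python) =====
-- def _go(cs):
--     if not cs:
--         return True
--     if len(cs) == 1:
--         return cs[0].isalpha()
--     return cs[0].isalpha() and cs[1].isdigit() and _go(cs[2:])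
--
-- def string_check(s):
--     return _go(list(s))
-- ===== Notes on version B (the rewrite author's own statement) =====
-- stated objective: simpler
-- what changed: Replaces the index loop with a parity branch that builds a full bool list and then scans it for False by a short-circuiting two-characters-at-a-time recursion over the characters with no intermediate list.
import Mathlib
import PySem

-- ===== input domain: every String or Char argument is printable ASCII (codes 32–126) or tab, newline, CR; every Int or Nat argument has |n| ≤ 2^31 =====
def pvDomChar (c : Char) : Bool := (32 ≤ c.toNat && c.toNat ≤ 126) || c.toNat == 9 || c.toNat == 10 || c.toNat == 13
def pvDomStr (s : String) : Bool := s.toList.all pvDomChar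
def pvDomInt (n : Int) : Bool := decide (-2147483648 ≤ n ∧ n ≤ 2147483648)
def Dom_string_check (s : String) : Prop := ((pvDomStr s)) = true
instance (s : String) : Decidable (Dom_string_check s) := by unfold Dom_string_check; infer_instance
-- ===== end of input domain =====

-- B replaces A's index loop (parity branch, builds a bool list, scans it for False) by a
-- short-circuiting two-characters-at-a-time recursion with no intermediate list (simpler).


-- ===== PORT A =====
def string_check (s : String) : Bool :=
  let l : List Bool :=
    (PySem.List.pyRange 0 (PySem.Str.len s) 1).foldl (fun l i =>
      if PySem.Int.mod i 2 == 0 && (PySem.Str.pyGet? s i).elim false PySem.Chars.isalpha then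
        l ++ [true]
      else if PySem.Int.mod i 2 != 0 && (PySem.Str.pyGet? s i).elim false PySem.Chars.isdigit then
        l ++ [true]
      else
        l ++ [false]) []
  if !(l.contains false) then true else false

-- ===== PORT B =====
def altGo : List Char → Bool
  | [] => true
  | [c] => PySem.Chars.isalpha c
  | c :: d :: rest => PySem.Chars.isalpha c && PySem.Chars.isdigit d && altGo rest

def string_check_alt (s : String) : Bool := altGo s.toList

-- ===== PRECONDITION & SPEC =====
def Spec_string_check (s : String) (out : Bool) : Prop := out = string_check_alt s
instance (s : String) (out : Bool) : Decidable (Spec_string_check s out) := by unfold Spec_string_check; infer_instance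

-- ===== CLAIM (what is proved, stated in full; the proofs are below) =====
def Claim_equal_string_check : Prop := ∀ (s : String), Dom_string_check s → Spec_string_check s (string_check s)

-- ===== LEMMAS AND PROOFS =====

-- A's per-index bool, as a function of the Nat index
def hh (cs : List Char) (k : Nat) : Bool :=
  if k % 2 == 0 then cs[k]?.elim false PySem.Chars.isalpha
  else cs[k]?.elim false PySem.Chars.isdigit

-- the value A appends at index i
def gA (s : String) (i : Int) : Bool :=
  if PySem.Int.mod i 2 == 0 && (PySem.Str.pyGet? s i).elim false PySem.Chars.isalpha then true
  else if PySem.Int.mod i 2 != 0 && (PySem.Str.pyGet? s i).elim false PySem.Chars.isdigit then true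
  else false

lemma hh_shift (c d : Char) (rest : List Char) (k : Nat) :
    hh (c :: d :: rest) (k + 2) = hh rest k := by
  simp [hh, Nat.add_mod_right]

lemma altGo_eq_all (cs : List Char) :
    altGo cs = (List.range cs.length).all (hh cs) := by
  induction cs using altGo.induct with
  | case1 => simp [altGo]
  | case2 c => simp [altGo, hh]
  | case3 c d rest ih =>
    have hr : List.range (rest.length + 2)
        = 0 :: 1 :: (List.range rest.length).map (· + 2) := by
      rw [List.range_succ_eq_map, List.range_succ_eq_map]
      simp [List.map_map, Function.comp_def]
    have h0 : hh (c :: d :: rest) 0 = PySem.Chars.isalpha c := by simp [hh]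
    have h1 : hh (c :: d :: rest) 1 = PySem.Chars.isdigit d := by simp [hh]
    simp only [altGo, List.length_cons, ih]
    rw [show rest.length + 1 + 1 = rest.length + 2 from rfl, hr]
    simp only [List.all_cons, List.all_map]
    have hcomp : (hh (c :: d :: rest) ∘ fun x => x + 2) = hh rest :=
      funext (fun k => hh_shift c d rest k)
    rw [h0, h1, hcomp, Bool.and_assoc]

lemma A_branch_eq (cs : List Char) (k : Nat) :
    (if PySem.Int.mod (k : Int) 2 == 0 && (cs[k]?).elim false PySem.Chars.isalpha then true
     else if PySem.Int.mod (k : Int) 2 != 0 && (cs[k]?).elim false PySem.Chars.isdigit then true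
     else false) = hh cs k := by
  rcases Nat.mod_two_eq_zero_or_one k with h | h
  · have h2 : (2 : Int) ∣ (k : Int) := by omega
    have h3 : ¬((k : Int) % 2 = 1) := by omega
    simp [hh, h, h2]
  · have h2 : ¬((2 : Int) ∣ (k : Int)) := by omega
    have h3 : (k : Int) % 2 = 1 := by omega
    simp [hh, h, h3]

lemma if_contains_map {α : Type} (L : List α) (f : α → Bool) :
    (if !((L.map f).contains false) then true else false) = L.all f := by
  have h1 : ∀ (l : List Bool), l.contains false = !(l.all id) := by
    intro l; induction l with
    | nil => rfl
    | cons b l ih => cases b <;> simp_all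
  rw [h1, List.all_map]
  have h2 : (id ∘ f) = f := rfl
  rw [h2]
  cases hf : L.all f <;> simp

lemma string_check_eq_all (s : String) :
    string_check s = (List.range s.toList.length).all (hh s.toList) := by
  unfold string_check
  dsimp only
  have step_eq : (fun (l : List Bool) i =>
      if PySem.Int.mod i 2 == 0 && (PySem.Str.pyGet? s i).elim false PySem.Chars.isalpha then l ++ [true]
      else if PySem.Int.mod i 2 != 0 && (PySem.Str.pyGet? s i).elim false PySem.Chars.isdigit then l ++ [true]
      else l ++ [false]) = fun l i => l ++ [gA s i] := by
    funext l i; simp only [gA]; split_ifs <;> rfl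
  rw [step_eq, PySem.List.foldl_append_singleton_eq_map, List.nil_append, if_contains_map]
  have hlen : PySem.Str.len s = (s.toList.length : Int) := by simp [PySem.Str.len]
  rw [hlen, PySem.List.pyRange_one]
  simp only [Int.sub_zero, Int.toNat_natCast, List.all_map]
  refine List.all_congr rfl (fun k => ?_)
  show gA s ((0 : Int) + k) = hh s.toList k
  have hget : PySem.Str.pyGet? s ((k : Nat) : Int) = s.toList[k]? := by simp
  simp only [Int.zero_add, gA, hget]
  exact A_branch_eq s.toList k

-- ===== VERDICT (by name: the statement is the Claim_ definition above) =====
theorem string_check_spec : Claim_equal_string_check := by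
  intro s _
  unfold Spec_string_check string_check_alt
  rw [string_check_eq_all, altGo_eq_all]
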